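-- pv_equiv track=rewrite | github.com/SafeCWS/mathquest-worlds | scripts/validate-multiplication.py | validate_edge_cases
-- ===== SOURCE A (Python) =====
-- def validate_edge_cases(tables: dict[int, list[dict[str, int]]]) -> tuple[bool, list[str]]:
--     """Verify edge cases: min/max values, positive integers, factor ranges."""
--     errors: list[str] = []
--
--     all_products: list[int] = []
--     for table_num in range(1, 11):
--         if table_num not in tables:
--             continue
--         for fact in tables[table_num]:
--             a, b, product = fact["a"], fact["b"], fact["product"]
--             all_products.append(product)
--
--             # All products must be positive integers
--             if not isinstance(product, int) or product <= 0:
--                 errors.append(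
--                     f"Non-positive product: {a} x {b} = {product}"
--                 )
--
--             # Factor a must be in 1-10 (table number)
--             if a < 1 or a > 10:
--                 errors.append(f"Factor a out of range: {a}")
--
--             # Factor b must be in 1-10
--             if b < 1 or b > 10:
--                 errors.append(f"Factor b out of range: {b}")
--
--     if not all_products:
--         errors.append("No products found")
--         return False, errors
--
--     min_product = min(all_products)
--     max_product = max(all_products)
--
--     # 1 x 1 = 1 should be the minimum
--     if min_product != 1:
--         errors.append(f"Minimum product = {min_product} (expected 1 from 1x1)")
--
--     # 10 x 10 = 100 should be the maximum
--     if max_product != 100: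
--         errors.append(f"Maximum product = {max_product} (expected 100 from 10x10)")
--
--     # Verify specific known facts
--     known_facts = {
--         (1, 1): 1,
--         (10, 10): 100,
--         (5, 5): 25,
--         (7, 8): 56,
--         (9, 9): 81,
--         (6, 7): 42,
--         (3, 4): 12,
--         (8, 9): 72,
--     }
--     for (a, b), expected_product in known_facts.items():
--         found = False
--         for fact in tables.get(a, []):
--             if fact["b"] == b:
--                 found = True
--                 if fact["product"] != expected_product:
--                     errors.append(
--                         f"Known fact {a} x {b}: got {fact['product']} "
--                         f"(expected {expected_product})"
--                     )
--                 break
--         if not found: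
--             errors.append(f"Known fact {a} x {b} not found in table {a}")
--
--     return len(errors) == 0, errors
-- ===== SOURCE B (Python) =====
-- def validate_edge_cases(tables: dict[int, list[dict[str, int]]]) -> tuple[bool, list[str]]:
--     """Recursive/functional restructuring: recursion over table numbers builds the
--     (errors, products) pair back-to-front, min/max come from one sorted() call,
--     and the known-fact check is a filter-then-first comprehension instead of a
--     break-on-first scan."""
--
--     def fact_errors(fact: dict[str, int]) -> list[str]:
--         a, b, p = fact["a"], fact["b"], fact["product"]
--         msgs: list[str] = []
--         if p <= 0:
--             msgs.append(f"Non-positive product: {a} x {b} = {p}")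
--         if a < 1 or a > 10:
--             msgs.append(f"Factor a out of range: {a}")
--         if b < 1 or b > 10:
--             msgs.append(f"Factor b out of range: {b}")
--         return msgs
--
--     def walk(t: int) -> tuple[list[str], list[int]]:
--         if t > 10:
--             return [], []
--         errs, prods = walk(t + 1)
--         facts = tables.get(t, [])
--         return ([m for f in facts for m in fact_errors(f)] + errs,
--                 [f["product"] for f in facts] + prods)
--
--     errors, products = walk(1)
--     if not products:
--         return False, errors + ["No products found"]
--
--     sp = sorted(products)
--     if sp[0] != 1:
--         errors = errors + [f"Minimum product = {sp[0]} (expected 1 from 1x1)"]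
--     if sp[-1] != 100:
--         errors = errors + [f"Maximum product = {sp[-1]} (expected 100 from 10x10)"]
--
--     known_facts = [
--         ((1, 1), 1),
--         ((10, 10), 100),
--         ((5, 5), 25),
--         ((7, 8), 56),
--         ((9, 9), 81),
--         ((6, 7), 42),
--         ((3, 4), 12),
--         ((8, 9), 72),
--     ]
--     for (a, b), expected in known_facts:
--         matches = [f["product"] for f in tables.get(a, []) if f["b"] == b]
--         if not matches:
--             errors = errors + [f"Known fact {a} x {b} not found in table {a}"]
--         elif matches[0] != expected:
--             errors = errors + [f"Known fact {a} x {b}: got {matches[0]} (expected {expected})"]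
--
--     return not errors, errors
-- ===== Notes on version B (the rewrite author's own statement) =====
-- stated objective: alternative
-- what changed: B replaces A's imperative accumulation by a recursion over table numbers that builds (errors, products) back-to-front, takes min/max as the first and last element of one sorted() call instead of min()/max(), and answers each known-fact query by a filter-then-first comprehension instead of A's found-flag scan with break; error strings and order are unchanged.
import Mathlib
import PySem

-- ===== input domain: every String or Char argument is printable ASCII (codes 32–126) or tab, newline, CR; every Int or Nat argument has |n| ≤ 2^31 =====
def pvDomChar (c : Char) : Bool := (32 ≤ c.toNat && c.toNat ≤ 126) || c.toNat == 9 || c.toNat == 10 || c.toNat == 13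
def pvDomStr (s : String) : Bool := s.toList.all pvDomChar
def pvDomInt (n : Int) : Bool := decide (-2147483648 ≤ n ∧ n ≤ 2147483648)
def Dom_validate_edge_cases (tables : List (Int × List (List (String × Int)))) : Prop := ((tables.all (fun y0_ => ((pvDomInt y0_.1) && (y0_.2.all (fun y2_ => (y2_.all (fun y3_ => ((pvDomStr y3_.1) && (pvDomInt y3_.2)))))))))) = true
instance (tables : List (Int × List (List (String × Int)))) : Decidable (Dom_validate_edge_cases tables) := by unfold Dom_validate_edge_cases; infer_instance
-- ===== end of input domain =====

-- B replaces A's imperative accumulation by a recursion over table numbers building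
-- (errors, products) back-to-front, one sorted() call for min/max, and a
-- filter-then-first comprehension per known fact (objective: alternative; same
-- error strings and order).

-- shared formatting helpers (the exact f-strings of both Pythons)
def vecFGet (fact : List (String × Int)) (k : String) : Int :=
  ((PySem.Dict.mk fact).get? k).getD 0   -- fact[k]; Pre_ guarantees the key is present (KeyError excluded)

def vecErrNonPos (a b p : Int) : String :=
  "Non-positive product: " ++ PySem.Int.toStr a ++ " x " ++ PySem.Int.toStr b ++ " = " ++ PySem.Int.toStr p
def vecErrA (a : Int) : String := "Factor a out of range: " ++ PySem.Int.toStr a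
def vecErrB (b : Int) : String := "Factor b out of range: " ++ PySem.Int.toStr b
def vecErrMin (m : Int) : String := "Minimum product = " ++ PySem.Int.toStr m ++ " (expected 1 from 1x1)"
def vecErrMax (m : Int) : String := "Maximum product = " ++ PySem.Int.toStr m ++ " (expected 100 from 10x10)"
def vecErrMiss (a b : Int) : String :=
  "Known fact " ++ PySem.Int.toStr a ++ " x " ++ PySem.Int.toStr b ++ " not found in table " ++ PySem.Int.toStr a
def vecErrBad (a b got exp : Int) : String :=
  "Known fact " ++ PySem.Int.toStr a ++ " x " ++ PySem.Int.toStr b ++ ": got " ++ PySem.Int.toStr got ++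
  " (expected " ++ PySem.Int.toStr exp ++ ")"

def vecKnownFacts : List ((Int × Int) × Int) :=
  [((1, 1), 1), ((10, 10), 100), ((5, 5), 25), ((7, 8), 56), ((9, 9), 81), ((6, 7), 42), ((3, 4), 12), ((8, 9), 72)]

-- ===== PORT A =====
def vecAFactStep (st : List String × List Int) (fact : List (String × Int)) : List String × List Int :=
  let a := vecFGet fact "a"
  let b := vecFGet fact "b"
  let p := vecFGet fact "product"
  let all_products := st.2 ++ [p]
  let errors := st.1
  let errors := if p ≤ 0 then errors ++ [vecErrNonPos a b p] else errors
  let errors := if a < 1 ∨ a > 10 then errors ++ [vecErrA a] else errors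
  let errors := if b < 1 ∨ b > 10 then errors ++ [vecErrB b] else errors
  (errors, all_products)

def vecATableStep (tables : List (Int × List (List (String × Int)))) (st : List String × List Int) (t : Int) :
    List String × List Int :=
  match (PySem.Dict.mk tables).get? t with
  | none => st                                   -- "if table_num not in tables: continue"
  | some facts => facts.foldl vecAFactStep st

-- the inner loop with found-flag and break of A's known-fact check
def vecAScan (a b exp : Int) (facts : List (List (String × Int))) (errors : List String) : List String :=
  match facts with
  | [] => errors ++ [vecErrMiss a b]
  | f :: rest =>
    if vecFGet f "b" == b then
      (if vecFGet f "product" ≠ exp then errors ++ [vecErrBad a b (vecFGet f "product") exp] else errors)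
    else vecAScan a b exp rest errors

def validate_edge_cases (tables : List (Int × List (List (String × Int)))) : Bool × List String :=
  let st := (PySem.List.pyRange 1 11 1).foldl (vecATableStep tables) ([], [])
  let errors := st.1
  let all_products := st.2
  if all_products = [] then (false, errors ++ ["No products found"])
  else
    let min_product := (PySem.List.min? all_products (fun x => x)).getD 0   -- min(all_products); nonempty here
    let max_product := (PySem.List.max? all_products (fun x => x)).getD 0
    let errors := if min_product ≠ 1 then errors ++ [vecErrMin min_product] else errors
    let errors := if max_product ≠ 100 then errors ++ [vecErrMax max_product] else errors
    let errors := vecKnownFacts.foldl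
      (fun errs kf => vecAScan kf.1.1 kf.1.2 kf.2 ((PySem.Dict.mk tables).getD kf.1.1 []) errs) errors
    (errors.length == 0, errors)

-- ===== PORT B =====
-- B's helper fact_errors(fact): the 0–3 messages of one fact, in A's order
def vecFactErrs (fact : List (String × Int)) : List String :=
  let a := vecFGet fact "a"
  let b := vecFGet fact "b"
  let p := vecFGet fact "product"
  (if p ≤ 0 then [vecErrNonPos a b p] else []) ++
  (if a < 1 ∨ a > 10 then [vecErrA a] else []) ++
  (if b < 1 ∨ b > 10 then [vecErrB b] else [])

-- B's recursive walk(t): (errors, products) of tables t..10, built back-to-front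
def vecBWalk (tables : List (Int × List (List (String × Int)))) (t : Int) : List String × List Int :=
  if t > 10 then ([], [])
  else
    let rest := vecBWalk tables (t + 1)
    let facts := (PySem.Dict.mk tables).getD t []
    (facts.flatMap vecFactErrs ++ rest.1, facts.map (fun f => vecFGet f "product") ++ rest.2)
termination_by (11 - t).toNat
decreasing_by omega

def validate_edge_cases_alt (tables : List (Int × List (List (String × Int)))) : Bool × List String :=
  let wp := vecBWalk tables 1
  let errors := wp.1
  let products := wp.2
  if products = [] then (false, errors ++ ["No products found"])
  else
    let sp := PySem.List.sorted products (fun x => x)        -- sorted(products)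
    let mn := (PySem.List.pyGet? sp 0).getD 0                -- sp[0]; sp nonempty here
    let mx := (PySem.List.pyGet? sp (-1)).getD 0             -- sp[-1]
    let errors := if mn ≠ 1 then errors ++ [vecErrMin mn] else errors
    let errors := if mx ≠ 100 then errors ++ [vecErrMax mx] else errors
    let errors := vecKnownFacts.foldl
      (fun errs kf =>
        let hits := (((PySem.Dict.mk tables).getD kf.1.1 []).filter
            (fun f => vecFGet f "b" == kf.1.2)).map (fun f => vecFGet f "product")
        if hits = [] then errs ++ [vecErrMiss kf.1.1 kf.1.2]
        else if (PySem.List.pyGet? hits 0).getD 0 ≠ kf.2 then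
          errs ++ [vecErrBad kf.1.1 kf.1.2 ((PySem.List.pyGet? hits 0).getD 0) kf.2]
        else errs) errors
    (errors.isEmpty, errors)                                 -- "return not errors, errors"

-- ===== PRECONDITION & SPEC =====
-- Pre_ excludes exactly the inputs on which Python A raises KeyError: a fact dict
-- reachable from a table key in 1..10 that lacks one of the keys "a", "b", "product".
def Pre_validate_edge_cases (tables : List (Int × List (List (String × Int)))) : Prop :=
  ∀ t ∈ PySem.List.pyRange 1 11 1, ∀ fact ∈ (PySem.Dict.mk tables).getD t [],
    (PySem.Dict.mk fact).contains "a" = true ∧ (PySem.Dict.mk fact).contains "b" = true ∧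
    (PySem.Dict.mk fact).contains "product" = true
instance (tables : List (Int × List (List (String × Int)))) : Decidable (Pre_validate_edge_cases tables) := by
  unfold Pre_validate_edge_cases; infer_instance

def pvWitness_validate_edge_cases : (List (Int × List (List (String × Int)))) :=
  [(1, [[("a", 1), ("b", 1), ("product", 1)]])]

def Spec_validate_edge_cases (tables : List (Int × List (List (String × Int)))) (out : Bool × List String) : Prop := out = validate_edge_cases_alt tables
instance (tables : List (Int × List (List (String × Int)))) (out : Bool × List String) : Decidable (Spec_validate_edge_cases tables out) := by unfold Spec_validate_edge_cases; infer_instance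

-- ===== CLAIM (what is proved, stated in full; the proofs are below) =====
def Claim_equal_validate_edge_cases : Prop := ∀ (tables : List (Int × List (List (String × Int)))), Dom_validate_edge_cases tables → Pre_validate_edge_cases tables → Spec_validate_edge_cases tables (validate_edge_cases tables)

-- ===== LEMMAS AND PROOFS =====

-- proof-side helpers: product of a fact, facts visited by the 1..10 sweep,
-- the first matching-b product of a table
def vecProd (fact : List (String × Int)) : Int := vecFGet fact "product"

def vecVisited (tables : List (Int × List (List (String × Int)))) (ts : List Int) : List (List (String × Int)) :=
  ts.flatMap (fun t => (PySem.Dict.mk tables).getD t [])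

def vecFirstB (facts : List (List (String × Int))) (b : Int) : Option Int :=
  (facts.find? (fun f => vecFGet f "b" == b)).map (fun f => vecFGet f "product")

theorem vecA_inner (facts : List (List (String × Int))) (errs : List String) (prods : List Int) :
    facts.foldl vecAFactStep (errs, prods) =
      (errs ++ facts.flatMap vecFactErrs, prods ++ facts.map vecProd) := by
  induction facts generalizing errs prods with
  | nil => simp
  | cons f rest ih =>
    simp only [List.foldl_cons, vecAFactStep, List.flatMap_cons, List.map_cons]
    rw [ih]
    simp only [vecFactErrs, vecProd]
    split_ifs <;> simp

theorem vecA_outer (tables : List (Int × List (List (String × Int)))) (ts : List Int)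
    (errs : List String) (prods : List Int) :
    ts.foldl (vecATableStep tables) (errs, prods) =
      (errs ++ (vecVisited tables ts).flatMap vecFactErrs,
       prods ++ (vecVisited tables ts).map vecProd) := by
  induction ts generalizing errs prods with
  | nil => simp [vecVisited]
  | cons t rest ih =>
    cases h : (PySem.Dict.mk tables).get? t with
    | none =>
      simp only [List.foldl_cons, vecATableStep, h, vecVisited, List.flatMap_cons,
        PySem.Dict.getD_of_get?_eq_none _ _ h]
      simpa [vecVisited] using ih errs prods
    | some facts =>
      simp only [List.foldl_cons, vecATableStep, h, vecVisited, List.flatMap_cons,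
        PySem.Dict.getD_of_get?_eq_some _ _ h]
      rw [vecA_inner, ih]
      simp [vecVisited]

-- B's walk(t) is the 1..10 sweep restricted to t..10
theorem vecBWalk_eq (tables : List (Int × List (List (String × Int)))) (t : Int) (ht : 1 ≤ t) :
    vecBWalk tables t =
      ((vecVisited tables (PySem.List.pyRange t 11 1)).flatMap vecFactErrs,
       (vecVisited tables (PySem.List.pyRange t 11 1)).map vecProd) := by
  by_cases h : t > 10
  · rw [vecBWalk]
    simp [h, vecVisited, PySem.List.pyRange_one_eq_nil (by omega : (11:Int) ≤ t)]
  · rw [vecBWalk]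
    simp only [h, if_false]
    rw [vecBWalk_eq tables (t + 1) (by omega),
      PySem.List.pyRange_one_cons (by omega : t < 11)]
    simp [vecVisited, vecProd]
termination_by (11 - t).toNat
decreasing_by omega

theorem vecScan_eq (facts : List (List (String × Int))) (a b e : Int) (errs : List String) :
    vecAScan a b e facts errs =
      (match vecFirstB facts b with
       | none => errs ++ [vecErrMiss a b]
       | some got => if got ≠ e then errs ++ [vecErrBad a b got e] else errs) := by
  induction facts with
  | nil => simp [vecAScan, vecFirstB]
  | cons f rest ih =>
    by_cases hb : vecFGet f "b" = b
    · simp [vecAScan, vecFirstB, hb]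
    · simp only [vecAScan, beq_iff_eq, hb, if_false, ih]
      simp [vecFirstB, hb]

-- B's filter-then-first comprehension computes the same match on every table
theorem vecMatches_eq (facts : List (List (String × Int))) (b : Int) :
    ((facts.filter (fun f => vecFGet f "b" == b)).map (fun f => vecFGet f "product")).head? =
      vecFirstB facts b := by
  rw [vecFirstB, ← List.head?_filter]
  cases (facts.filter (fun f => vecFGet f "b" == b)) <;> simp

-- min/max of a nonempty list via its sorted form (antisymmetry of ≤)
theorem vecSorted_head_min (ps : List Int) (hne : ps ≠ []) :
    (PySem.List.pyGet? (PySem.List.sorted ps (fun x => x)) 0).getD 0 =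
      (PySem.List.min? ps (fun x => x)).getD 0 := by
  cases hsp : PySem.List.sorted ps (fun x => x) with
  | nil => exact absurd ((PySem.List.sorted_eq_nil_iff _ _ _).mp hsp) hne
  | cons m tail =>
    cases hmin : PySem.List.min? ps (fun x => x) with
    | none => exact absurd ((PySem.List.min?_eq_none_iff _ _).mp hmin) hne
    | some m' =>
      simp only [PySem.List.pyGet?_zero_cons, Option.getD_some]
      have hm_mem : m ∈ ps := (PySem.List.mem_sorted ps _ _ m).mp (hsp ▸ List.mem_cons_self)
      exact le_antisymm
        (PySem.List.key_head_sorted_le ps (fun x => x) hsp m' (PySem.List.min?_mem hmin))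
        (PySem.List.min?_isMin hmin m hm_mem)

theorem vecSorted_last_max (ps : List Int) (hne : ps ≠ []) :
    (PySem.List.pyGet? (PySem.List.sorted ps (fun x => x)) (-1)).getD 0 =
      (PySem.List.max? ps (fun x => x)).getD 0 := by
  have hspne : PySem.List.sorted ps (fun x => x) ≠ [] := by
    simpa [PySem.List.sorted_eq_nil_iff] using hne
  cases hmax : PySem.List.max? ps (fun x => x) with
  | none => exact absurd ((PySem.List.max?_eq_none_iff _ _).mp hmax) hne
  | some m' =>
    have hlen : 0 < (PySem.List.sorted ps (fun x => x)).length := List.length_pos_iff.mpr hspne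
    rw [PySem.List.pyGet?_neg_one, List.getLast?_eq_getElem?]
    have hidx : (PySem.List.sorted ps (fun x => x)).length - 1 < (PySem.List.sorted ps (fun x => x)).length := by omega
    simp only [List.getElem?_eq_getElem hidx, Option.getD_some]
    have hlast_mem : (PySem.List.sorted ps (fun x => x))[(PySem.List.sorted ps (fun x => x)).length - 1] ∈ ps :=
      (PySem.List.mem_sorted ps _ _ _).mp (List.getElem_mem hidx)
    apply le_antisymm
    · exact PySem.List.max?_isMax hmax _ hlast_mem
    · obtain ⟨i, hi, hie⟩ := List.mem_iff_getElem.mp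
        ((PySem.List.mem_sorted ps (fun x => x) false m').mpr (PySem.List.max?_mem hmax))
      calc m' = (PySem.List.sorted ps (fun x => x))[i] := hie.symm
        _ ≤ _ := PySem.List.key_sorted_getElem_mono ps (fun x => x) (by omega) hidx

-- ===== VERDICT (by name: the statement is the Claim_ definition above) =====

theorem vecFinish (E : List String) : ((E.length == 0 : Bool), E) = (E.isEmpty, E) := by
  cases E <;> simp

theorem validate_edge_cases_spec : Claim_equal_validate_edge_cases := by
  intro tables _ _
  show validate_edge_cases tables = validate_edge_cases_alt tables
  unfold validate_edge_cases validate_edge_cases_alt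
  rw [vecA_outer, vecBWalk_eq tables 1 (by omega)]
  simp only [List.nil_append]
  cases hP : (vecVisited tables (PySem.List.pyRange 1 11 1)).map vecProd with
  | nil => simp
  | cons p rest =>
    have hne : (vecVisited tables (PySem.List.pyRange 1 11 1)).map vecProd ≠ [] := by
      rw [hP]; exact List.cons_ne_nil _ _
    rw [← hP]
    simp only [hne, if_false]
    rw [vecSorted_head_min _ hne, vecSorted_last_max _ hne]
    have hstep : (fun (errs : List String) (kf : (Int × Int) × Int) =>
        vecAScan kf.1.1 kf.1.2 kf.2 ((PySem.Dict.mk tables).getD kf.1.1 []) errs) =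
      (fun (errs : List String) (kf : (Int × Int) × Int) =>
        if (((PySem.Dict.mk tables).getD kf.1.1 []).filter (fun f => vecFGet f "b" == kf.1.2)).map (fun f => vecFGet f "product") = [] then
          errs ++ [vecErrMiss kf.1.1 kf.1.2]
        else if (PySem.List.pyGet? ((((PySem.Dict.mk tables).getD kf.1.1 []).filter (fun f => vecFGet f "b" == kf.1.2)).map (fun f => vecFGet f "product")) 0).getD 0 ≠ kf.2 then
          errs ++ [vecErrBad kf.1.1 kf.1.2 ((PySem.List.pyGet? ((((PySem.Dict.mk tables).getD kf.1.1 []).filter (fun f => vecFGet f "b" == kf.1.2)).map (fun f => vecFGet f "product")) 0).getD 0) kf.2]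
        else errs) := by
      funext errs kf
      rw [vecScan_eq]
      have h := vecMatches_eq ((PySem.Dict.mk tables).getD kf.1.1 []) kf.1.2
      cases hm : (((PySem.Dict.mk tables).getD kf.1.1 []).filter
          (fun f => vecFGet f "b" == kf.1.2)).map (fun f => vecFGet f "product") with
      | nil => rw [hm] at h; simp only [List.head?_nil] at h; simp [← h]
      | cons x xs =>
        rw [hm] at h; simp only [List.head?_cons] at h
        simp [hm, ← h]
    rw [hstep]
    exact vecFinish _
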